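-- pv_equiv track=rewrite | github.com/takenoko9973/GaNController | src/gan_controller/common/types/quantity/unit.py | split_unit
-- ===== SOURCE A (Python) =====
-- BASE_UNITS = {
--     "": "dimensionless",
--     "A": "current",
--     "V": "voltage",
--     "W": "power",
--     "s": "time",
--     "m": "length",
--     "Pa": "pressure",
--     "Ω": "resistance",
--     "℃": "celsius",
-- }
--
-- def split_unit(unit: str, known_prefixes: set[str]) -> tuple[str, str]:
--     """接頭辞と単位を分離"""
--     # 無次元
--     if unit in known_prefixes:
--         return unit, ""
--
--     # 単位部分を検索
--     dimension_units = BASE_UNITS.keys() - {""}  # 無次元を除いた単位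
--     for base in sorted(dimension_units, key=len, reverse=True):  # 長い単位から先に見る (Pa)
--         if unit.endswith(base):
--             prefix = unit[: -len(base)]
--             if prefix in known_prefixes:
--                 return prefix, base
--
--     msg = f"Invalid unit: {unit}"
--     raise ValueError(msg)
-- ===== SOURCE B (Python) =====
-- BASE_UNITS = {
--     "": "dimensionless",
--     "A": "current",
--     "V": "voltage",
--     "W": "power",
--     "s": "time",
--     "m": "length",
--     "Pa": "pressure",
--     "Ω": "resistance",
--     "℃": "celsius",
-- }
--
-- def split_unit(unit: str, known_prefixes: set[str]) -> tuple[str, str]: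
--     """接頭辞と単位を分離 — scan candidate prefixes instead of base units."""
--     if unit in known_prefixes:
--         return unit, ""
--     for p in known_prefixes:
--         base = unit[len(p):]
--         if base and unit.startswith(p) and base in BASE_UNITS:
--             return p, base
--     msg = f"Invalid unit: {unit}"
--     raise ValueError(msg)
-- ===== Notes on version B (the rewrite author's own statement) =====
-- stated objective: alternative
-- what changed: Instead of sorting the base units by length and scanning them with endswith + negative-slice prefix extraction, B scans the known prefixes, takes the remaining suffix and checks it is a non-empty key of BASE_UNITS; the unique valid split (no base unit is a suffix of another) makes both searches agree.
import Mathlib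
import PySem

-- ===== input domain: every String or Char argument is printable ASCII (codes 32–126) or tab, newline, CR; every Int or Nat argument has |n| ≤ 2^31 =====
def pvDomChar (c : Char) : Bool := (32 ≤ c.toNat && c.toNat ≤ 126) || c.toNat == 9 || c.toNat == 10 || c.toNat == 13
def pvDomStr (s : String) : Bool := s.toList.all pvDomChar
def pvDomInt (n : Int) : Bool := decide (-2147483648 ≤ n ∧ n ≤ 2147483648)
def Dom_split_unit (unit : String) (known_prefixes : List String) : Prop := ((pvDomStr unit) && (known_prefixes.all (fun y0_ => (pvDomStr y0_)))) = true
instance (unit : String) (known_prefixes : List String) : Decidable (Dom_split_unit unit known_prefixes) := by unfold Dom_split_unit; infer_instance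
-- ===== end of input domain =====

-- B scans the known prefixes and dict-looks-up the remaining suffix, instead of A's
-- length-sorted scan of base units with endswith; same return value wherever A returns.

-- ===== PORT A =====
def pvBaseUnits : PySem.Dict String String :=
  PySem.Dict.ofList [("", "dimensionless"), ("A", "current"), ("V", "voltage"),
    ("W", "power"), ("s", "time"), ("m", "length"), ("Pa", "pressure"),
    ("Ω", "resistance"), ("℃", "celsius")]

-- the for-loop over the sorted base units; ("", "") stands for the ValueError (outside Pre_)
def splitA_go (unit : String) (known_prefixes : List String) : List String → String × String
  | [] => ("", "")
  | base :: rest =>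
      if PySem.Str.endswith unit base then
        let prefix_ := PySem.Str.slice unit none (some (-(base.length : Int)))
        if prefix_ ∈ known_prefixes then (prefix_, base)
        else splitA_go unit known_prefixes rest
      else splitA_go unit known_prefixes rest

def split_unit (unit : String) (known_prefixes : List String) : String × String :=
  if unit ∈ known_prefixes then (unit, "")
  else
    let dimension_units := PySem.Set.diff (PySem.Set.ofList (PySem.Dict.keys pvBaseUnits)) [""]
    splitA_go unit known_prefixes
      (PySem.List.sorted dimension_units (fun b => b.length) true)

-- ===== PORT B =====
-- the for-loop over the known prefixes; ("", "") stands for the ValueError (outside Pre_)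
def splitB_go (unit : String) : List String → String × String
  | [] => ("", "")
  | p :: rest =>
      let base := PySem.Str.slice unit (some (p.length : Int)) none
      if base ≠ "" ∧ PySem.Str.startswith unit p = true ∧ PySem.Dict.contains pvBaseUnits base = true then
        (p, base)
      else splitB_go unit rest

def split_unit_alt (unit : String) (known_prefixes : List String) : String × String :=
  if unit ∈ known_prefixes then (unit, "")
  else splitB_go unit known_prefixes

-- ===== PRECONDITION & SPEC =====
def pvBaseList : List String := ["A", "V", "W", "s", "m", "Pa", "Ω", "℃"]

-- Pre_ excludes exactly the inputs on which A raises ValueError (no prefix+base-unit split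
-- of the unit string exists); B raises ValueError there too.
def Pre_split_unit (unit : String) (known_prefixes : List String) : Prop :=
  unit ∈ known_prefixes ∨
    ∃ b ∈ pvBaseList, ∃ p ∈ known_prefixes, p.toList ++ b.toList = unit.toList

instance (unit : String) (known_prefixes : List String) : Decidable (Pre_split_unit unit known_prefixes) := by
  unfold Pre_split_unit; infer_instance

def pvWitness_split_unit : String × List String := ("kPa", ["", "k", "m"])

def Spec_split_unit (unit : String) (known_prefixes : List String) (out : String × String) : Prop := out = split_unit_alt unit known_prefixes
instance (unit : String) (known_prefixes : List String) (out : String × String) : Decidable (Spec_split_unit unit known_prefixes out) := by unfold Spec_split_unit; infer_instance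

-- ===== CLAIM (what is proved, stated in full; the proofs are below) =====
def Claim_equal_split_unit : Prop := ∀ (unit : String) (known_prefixes : List String), Dom_split_unit unit known_prefixes → Pre_split_unit unit known_prefixes → Spec_split_unit unit known_prefixes (split_unit unit known_prefixes)

-- ===== LEMMAS AND PROOFS =====

-- no base unit is a (string-)suffix of another
lemma base_suffix_antisymm : ∀ b₁ ∈ pvBaseList, ∀ b₂ ∈ pvBaseList,
    b₁.toList <:+ b₂.toList → b₁ = b₂ := by decide

lemma base_ne_nil : ∀ b ∈ pvBaseList, b.toList ≠ [] := by decide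

lemma base_contains : ∀ b ∈ pvBaseList, PySem.Dict.contains pvBaseUnits b = true := by decide

-- the concrete list A sorts and scans
lemma sortedBases_eq :
    PySem.List.sorted (PySem.Set.diff (PySem.Set.ofList (PySem.Dict.keys pvBaseUnits)) [""])
      (fun b => b.length) true = ["Pa", "A", "V", "W", "s", "m", "Ω", "℃"] := by
  decide

lemma mem_sortedBases_iff (b : String) :
    b ∈ (["Pa", "A", "V", "W", "s", "m", "Ω", "℃"] : List String) ↔ b ∈ pvBaseList := by
  simp [pvBaseList]; tauto

lemma endswith_iff (s p : String) : PySem.Str.endswith s p = true ↔ p.toList <:+ s.toList := by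
  simp [PySem.Str.endswith_eq, PySem.Chars.endswith_iff]

lemma startswith_iff (s p : String) : PySem.Str.startswith s p = true ↔ p.toList <+: s.toList := by
  simp [PySem.Str.startswith_eq, PySem.Chars.startswith_iff]

-- unit[:-len(b₀)] recovers the prefix when unit = p₀ ++ b₀
lemma sliceA_eq (unit p₀ b₀ : String) (hsplit : p₀.toList ++ b₀.toList = unit.toList)
    (hne : b₀.toList ≠ []) :
    PySem.Str.slice unit none (some (-(b₀.length : Int))) = p₀ := by
  apply String.toList_inj.mp
  have hk : 0 < b₀.length := by
    cases hl : b₀.toList with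
    | nil => exact absurd hl hne
    | cons c t => simp [← String.length_toList, hl]
  have : (PySem.Str.slice unit none (some (-(b₀.length : Int)))).toList
      = PySem.List.slice unit.toList none (some (-(b₀.length : Int))) := by simp
  rw [this, PySem.List.slice_to_neg_natCast _ _ hk]
  rw [← hsplit]
  simp [String.length_toList]

-- unit[len(p₀):] recovers the base when unit = p₀ ++ b₀
lemma sliceB_eq (unit p₀ b₀ : String) (hsplit : p₀.toList ++ b₀.toList = unit.toList) :
    PySem.Str.slice unit (some (p₀.length : Int)) none = b₀ := by
  apply String.toList_inj.mp
  have : (PySem.Str.slice unit (some (p₀.length : Int)) none).toList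
      = PySem.List.slice unit.toList (some (p₀.length : Int)) none := by simp
  rw [this, PySem.List.slice_from_natCast]
  rw [← hsplit]
  simp [String.length_toList]

-- A's loop returns (p₀, b₀) when b₀ is the unique base suffix of unit and p₀ ∈ kp splits it
lemma splitA_go_spec (unit : String) (kp : List String) (L : List String)
    (p₀ b₀ : String) (hb : b₀ ∈ L)
    (hsplit : p₀.toList ++ b₀.toList = unit.toList) (hp : p₀ ∈ kp)
    (hne : b₀.toList ≠ [])
    (huniq : ∀ b ∈ L, b.toList <:+ unit.toList → b = b₀) :
    splitA_go unit kp L = (p₀, b₀) := by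
  induction L with
  | nil => cases hb
  | cons b rest ih =>
      by_cases hend : PySem.Str.endswith unit b = true
      · have hbb : b = b₀ := huniq b (by simp) ((endswith_iff unit b).mp hend)
        subst hbb
        have hpre := sliceA_eq unit p₀ b hsplit hne
        simp only [splitA_go]
        rw [if_pos hend, hpre, if_pos hp]
      · have hb' : b₀ ∈ rest := by
          cases hb with
          | head =>
              exact absurd ((endswith_iff unit b₀).mpr ⟨p₀.toList, hsplit⟩) hend
          | tail _ h => exact h
        have hstep : splitA_go unit kp (b :: rest) = splitA_go unit kp rest := by
          simp only [splitA_go]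
          rw [if_neg hend]
        rw [hstep]
        exact ih hb' (fun b hbm hs => huniq b (by simp [hbm]) hs)

-- B's condition holds exactly at the unique prefix splitting unit into prefix ++ base-unit
lemma splitB_cond_iff (unit p : String) :
    ((PySem.Str.slice unit (some (p.length : Int)) none ≠ "" ∧
      PySem.Str.startswith unit p = true ∧
      PySem.Dict.contains pvBaseUnits (PySem.Str.slice unit (some (p.length : Int)) none) = true))
    ↔ ∃ b ∈ pvBaseList, p.toList ++ b.toList = unit.toList := by
  constructor
  · rintro ⟨hne, hsw, hct⟩
    obtain ⟨t, ht⟩ := (startswith_iff unit p).mp hsw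
    have hb : (PySem.Str.slice unit (some (p.length : Int)) none).toList = t := by
      have h1 : (PySem.Str.slice unit (some (p.length : Int)) none).toList
          = PySem.List.slice unit.toList (some (p.length : Int)) none := by simp
      rw [h1, PySem.List.slice_from_natCast, ← ht]
      simp [String.length_toList]
    refine ⟨PySem.Str.slice unit (some (p.length : Int)) none, ?_, by rw [hb]; exact ht⟩
    have hmem : PySem.Str.slice unit (some (p.length : Int)) none ∈ PySem.Dict.keys pvBaseUnits :=
      (PySem.Dict.contains_iff_mem_keys _ _).mp hct
    have hkeys : PySem.Dict.keys pvBaseUnits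
        = ["", "A", "V", "W", "s", "m", "Pa", "Ω", "℃"] := by decide
    rw [hkeys] at hmem
    simp only [List.mem_cons, List.not_mem_nil, or_false] at hmem
    rcases hmem with h|h|h|h|h|h|h|h|h <;>
      first
        | (exact absurd h hne)
        | (rw [h]; decide)
  · rintro ⟨b, hbm, hsplit⟩
    have hb := sliceB_eq unit p b hsplit
    rw [hb]
    refine ⟨?_, (startswith_iff unit p).mpr ⟨b.toList, hsplit⟩, base_contains b hbm⟩
    intro h
    exact base_ne_nil b hbm (by rw [h]; rfl)

-- B's loop returns (p₀, b₀) when p₀ is the unique prefix in L splitting unit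
lemma splitB_go_spec (unit : String) (L : List String) (p₀ b₀ : String)
    (hp : p₀ ∈ L) (hb : b₀ ∈ pvBaseList)
    (hsplit : p₀.toList ++ b₀.toList = unit.toList)
    (huniq : ∀ p ∈ L, (∃ b ∈ pvBaseList, p.toList ++ b.toList = unit.toList) → p = p₀) :
    splitB_go unit L = (p₀, b₀) := by
  induction L with
  | nil => cases hp
  | cons p rest ih =>
      by_cases hc : (PySem.Str.slice unit (some (p.length : Int)) none ≠ "" ∧
          PySem.Str.startswith unit p = true ∧
          PySem.Dict.contains pvBaseUnits (PySem.Str.slice unit (some (p.length : Int)) none) = true)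
      · have hpp : p = p₀ := huniq p (by simp) ((splitB_cond_iff unit p).mp hc)
        subst hpp
        simp only [splitB_go]
        rw [if_pos hc, sliceB_eq unit p b₀ hsplit]
      · have hpp : p ≠ p₀ := by
          intro h; subst h
          exact hc ((splitB_cond_iff unit p).mpr ⟨b₀, hb, hsplit⟩)
        have hp' : p₀ ∈ rest := by
          cases hp with
          | head => exact absurd rfl hpp
          | tail _ h => exact h
        have hstep : splitB_go unit (p :: rest) = splitB_go unit rest := by
          simp only [splitB_go]
          rw [if_neg hc]
        rw [hstep]
        exact ih hp' (fun q hq he => huniq q (by simp [hq]) he)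

theorem split_unit_eq (unit : String) (kp : List String)
    (h : Pre_split_unit unit kp) : split_unit unit kp = split_unit_alt unit kp := by
  unfold split_unit split_unit_alt
  by_cases hm : unit ∈ kp
  · simp [hm]
  · rw [if_neg hm, if_neg hm]
    rcases h with h | ⟨b₀, hb, p₀, hp, hsplit⟩
    · exact absurd h hm
    have huB : ∀ b ∈ pvBaseList, b.toList <:+ unit.toList → b = b₀ := by
      intro b hbm hs
      have hs₀ : b₀.toList <:+ unit.toList := ⟨p₀.toList, hsplit⟩
      rcases List.suffix_or_suffix_of_suffix hs hs₀ with h' | h'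
      · exact base_suffix_antisymm b hbm b₀ hb h'
      · exact (base_suffix_antisymm b₀ hb b hbm h').symm
    show splitA_go unit kp
        (PySem.List.sorted (PySem.Set.diff (PySem.Set.ofList (PySem.Dict.keys pvBaseUnits)) [""])
          (fun b => b.length) true) = splitB_go unit kp
    rw [sortedBases_eq]
    rw [splitA_go_spec unit kp _ p₀ b₀ ((mem_sortedBases_iff b₀).mpr hb) hsplit hp
        (base_ne_nil b₀ hb) (fun b hbm hs => huB b ((mem_sortedBases_iff b).mp hbm) hs)]
    rw [splitB_go_spec unit kp p₀ b₀ hp hb hsplit ?_]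
    intro q hq ⟨b, hbm, hsp⟩
    have hbb : b = b₀ := huB b hbm ⟨q.toList, hsp⟩
    subst hbb
    have : q.toList = p₀.toList := by
      apply List.append_cancel_right (bs := b.toList)
      rw [hsp, hsplit]
    exact String.toList_inj.mp this

-- ===== VERDICT (by name: the statement is the Claim_ definition above) =====
theorem split_unit_spec : Claim_equal_split_unit := by
  intro unit kp _ hpre
  unfold Spec_split_unit
  exact split_unit_eq unit kp hpre
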